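-- pv_equiv track=rewrite | github.com/jaylin0418/Traditional-Chinese-Dialogue-Data-Generation | open_source/syn_ver2_breezy.py | merge_overlapping_user_lines
-- ===== SOURCE A (Python) =====
-- def merge_overlapping_user_lines(lines):
--     merged_lines = []
--     i = 0
--     while i < len(lines):
--         line = lines[i]
--         # Check if this is a User line and the next line is an [overlap] User line
--         if line.startswith("User:") and i + 1 < len(lines) and lines[i + 1].startswith(
--             "[overlap] User:"
--         ):
--             # Remove the label from the overlap line and merge
--             merged_text = (
--                 line.rstrip()
--                 + " "
--                 + lines[i + 1].replace("[overlap] User:", "", 1).lstrip()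
--             )
--             merged_lines.append("User:" + merged_text[len("User:") :])
--             i += 2  # Skip the next line as it's merged
--         else:
--             merged_lines.append(line)
--             i += 1
--     return merged_lines
-- ===== SOURCE B (Python) =====
-- def merge_overlapping_user_lines(lines):
--     OVERLAP = "[overlap] User:"
--     result = []
--     prev_user = False
--     for cur in lines:
--         if prev_user and cur.startswith(OVERLAP):
--             result[-1] = result[-1].rstrip() + " " + cur[len(OVERLAP):].lstrip()
--             prev_user = False
--         else:
--             result.append(cur)
--             prev_user = cur.startswith("User:")
--     return result
-- ===== Notes on version B (the rewrite author's own statement) =====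
-- stated objective: simpler
-- what changed: Replaces A's index-based while loop with lookahead (check lines[i+1], merge, skip i+=2, rebuild the merged string via 'User:'+text[5:] and replace(...,1)) by a single forward for-loop with a look-back boolean flag: an '[overlap] User:' line is merged into the previously appended result[-1] by prefix slicing, and the flag is cleared so a second overlap line is not chained.
import Mathlib
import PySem

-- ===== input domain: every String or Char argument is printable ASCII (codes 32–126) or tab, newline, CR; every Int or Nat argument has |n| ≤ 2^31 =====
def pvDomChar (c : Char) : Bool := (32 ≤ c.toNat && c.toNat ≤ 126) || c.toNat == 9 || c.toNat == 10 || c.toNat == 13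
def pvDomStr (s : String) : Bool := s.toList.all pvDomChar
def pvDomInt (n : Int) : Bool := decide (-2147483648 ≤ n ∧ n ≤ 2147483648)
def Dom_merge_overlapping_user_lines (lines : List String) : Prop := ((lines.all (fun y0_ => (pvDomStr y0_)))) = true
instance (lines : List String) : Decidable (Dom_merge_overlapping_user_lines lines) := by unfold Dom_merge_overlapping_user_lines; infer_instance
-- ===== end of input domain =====

-- B replaces A's lookahead-and-skip scan by a single forward pass with a look-back
-- flag that merges an overlap line into the previously emitted User line (objective:
-- simpler decomposition; same O(n) cost).

-- ===== PORT A =====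
-- hand port of Python `s.replace(old, new, 1)` (count = 1): scan left to right,
-- replace the FIRST occurrence of `old` only; exact, including old = "" (insert at front).
def pyReplace1 (old new : List Char) : List Char → List Char
  | [] => if old.isPrefixOf ([] : List Char) then new else []
  | c :: rest =>
      if old.isPrefixOf (c :: rest) then new ++ (c :: rest).drop old.length
      else c :: pyReplace1 old new rest

def merge_overlapping_user_lines : List String → List String
  | [] => []
  | line :: rest =>
    match rest with
    | next :: rest2 =>
      if PySem.Str.startswith line "User:" && PySem.Str.startswith next "[overlap] User:" then
        let mergedText := PySem.Str.rstrip line ++ " " ++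
          PySem.Str.lstrip (String.ofList (pyReplace1 "[overlap] User:".toList [] next.toList))
        -- "User:" + merged_text[len("User:"):]   (5 = len("User:"))
        ("User:" ++ PySem.Str.slice mergedText (some 5) none) :: merge_overlapping_user_lines rest2
      else line :: merge_overlapping_user_lines (next :: rest2)
    | [] => [line]
termination_by l => l.length
decreasing_by all_goals simp

-- ===== PORT B =====
-- state = (result list kept in reverse (Python appends / mutates result[-1]), prev_user flag)
def mergeStepB (st : List String × Bool) (cur : String) : List String × Bool :=
  if st.2 && PySem.Str.startswith cur "[overlap] User:" then
    -- result[-1] = result[-1].rstrip() + " " + cur[len(OVERLAP):].lstrip()   (15 = len("[overlap] User:"))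
    ((PySem.Str.rstrip st.1.headI ++ " " ++
        PySem.Str.lstrip (PySem.Str.slice cur (some 15) none)) :: st.1.tail, false)
  else (cur :: st.1, PySem.Str.startswith cur "User:")

def merge_overlapping_user_lines_alt (lines : List String) : List String :=
  (lines.foldl mergeStepB ([], false)).1.reverse

-- ===== PRECONDITION & SPEC =====
def Spec_merge_overlapping_user_lines (lines : List String) (out : List String) : Prop := out = merge_overlapping_user_lines_alt lines
instance (lines : List String) (out : List String) : Decidable (Spec_merge_overlapping_user_lines lines out) := by unfold Spec_merge_overlapping_user_lines; infer_instance

-- ===== CLAIM (what is proved, stated in full; the proofs are below) =====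
def Claim_equal_merge_overlapping_user_lines : Prop := ∀ (lines : List String), Dom_merge_overlapping_user_lines lines → Spec_merge_overlapping_user_lines lines (merge_overlapping_user_lines lines)

-- ===== LEMMAS AND PROOFS =====

-- rstrip never eats into a prefix that ends in a non-space character
lemma rstrip_user_append (t : List Char) :
    PySem.Chars.rstrip ("User:".toList ++ t) = "User:".toList ++ PySem.Chars.rstrip t := by
  simp only [PySem.Chars.rstrip, List.reverse_append, List.dropWhile_append]
  split
  · next h =>
      simp only [List.isEmpty_iff] at h
      rw [h]
      simp
      decide
  · simp

-- the two merged strings coincide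
lemma merged_eq (p c : String)
    (hp : PySem.Str.startswith p "User:" = true)
    (hc : PySem.Str.startswith c "[overlap] User:" = true) :
    PySem.Str.rstrip p ++ " " ++ PySem.Str.lstrip (PySem.Str.slice c (some 15) none)
      = "User:" ++ PySem.Str.slice
          (PySem.Str.rstrip p ++ " " ++
            PySem.Str.lstrip (String.ofList (pyReplace1 "[overlap] User:".toList [] c.toList)))
          (some 5) none := by
  rw [PySem.Str.startswith_eq, PySem.Chars.startswith_iff] at hp hc
  obtain ⟨t, ht⟩ := hp
  obtain ⟨d, hd⟩ := hc
  have hrep : pyReplace1 "[overlap] User:".toList [] c.toList = c.toList.drop 15 := by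
    rw [← hd]
    have hpre : ("[overlap] User:".toList).isPrefixOf ("[overlap] User:".toList ++ d) = true :=
      List.isPrefixOf_iff_prefix.mpr ⟨d, rfl⟩
    show pyReplace1 "[overlap] User:".toList []
        ('[' :: ("overlap] User:".toList ++ d)) = _
    rw [pyReplace1]
    simp_all
  apply String.toList_inj.mp
  simp only [String.toList_append, PySem.Str.toList_rstrip, PySem.Str.toList_lstrip,
    PySem.Str.toList_slice, PySem.Chars.slice_eq_listSlice, String.toList_ofList, hrep]
  have hs := fun (xs : List Char) (n : Nat) => PySem.List.slice_from_natCast xs n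
  rw [show (15 : Int) = ((15 : Nat) : Int) from rfl, show (5 : Int) = ((5 : Nat) : Int) from rfl,
    hs, hs]
  rw [← ht, rstrip_user_append]
  have h5 : ("User:".toList).length = 5 := by decide
  simp only [List.append_assoc]
  rw [List.drop_left' h5]

lemma mergeA_cons_not_user (c : String) (rest : List String)
    (h : PySem.Str.startswith c "User:" = false) :
    merge_overlapping_user_lines (c :: rest) = c :: merge_overlapping_user_lines rest := by
  cases rest with
  | nil => simp [merge_overlapping_user_lines.eq_def]
  | cons next r2 =>
      rw [merge_overlapping_user_lines.eq_def]
      simp at h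
      simp [h]

lemma foldB_main (lines : List String) : ∀ acc : List String,
    ((List.foldl mergeStepB (acc, false) lines).1
        = (merge_overlapping_user_lines lines).reverse ++ acc)
    ∧ (∀ p, PySem.Str.startswith p "User:" = true →
        (List.foldl mergeStepB (p :: acc, true) lines).1
          = (merge_overlapping_user_lines (p :: lines)).reverse ++ acc) := by
  induction lines with
  | nil =>
      intro acc
      refine ⟨by simp [merge_overlapping_user_lines.eq_def], ?_⟩
      intro p _
      simp [merge_overlapping_user_lines.eq_def]
  | cons c rest ih =>
      intro acc
      constructor
      · -- flag false: push c, flag becomes startswith c "User:"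
        rw [List.foldl_cons]
        show (List.foldl mergeStepB (mergeStepB (acc, false) c) rest).1 = _
        rw [show mergeStepB (acc, false) c = (c :: acc, PySem.Str.startswith c "User:") from by
              simp [mergeStepB]]
        cases hu : PySem.Str.startswith c "User:" with
        | true => exact (ih acc).2 c hu
        | false =>
            rw [(ih (c :: acc)).1, mergeA_cons_not_user c rest hu]
            simp
      · intro p hp
        rw [List.foldl_cons]
        cases hc : PySem.Str.startswith c "[overlap] User:" with
        | true =>
            -- merge into the previous User line
            have hc2 := hc; simp at hc2
            rw [show mergeStepB (p :: acc, true) c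
                  = ((PySem.Str.rstrip p ++ " " ++
                      PySem.Str.lstrip (PySem.Str.slice c (some 15) none)) :: acc, false) from by
                  simp [mergeStepB, hc2]]
            rw [(ih _).1]
            rw [show merge_overlapping_user_lines (p :: c :: rest)
                  = ("User:" ++ PySem.Str.slice
                      (PySem.Str.rstrip p ++ " " ++
                        PySem.Str.lstrip (String.ofList
                          (pyReplace1 "[overlap] User:".toList [] c.toList)))
                      (some 5) none) :: merge_overlapping_user_lines rest from by
                  have hp2 := hp; simp at hp2
                  rw [merge_overlapping_user_lines.eq_def]
                  simp [hp2, hc2]]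
            rw [merged_eq p c hp hc]
            simp
        | false =>
            have hc2 := hc; simp at hc2
            rw [show mergeStepB (p :: acc, true) c
                  = (c :: p :: acc, PySem.Str.startswith c "User:") from by
                  simp [mergeStepB, hc2]]
            have hA : merge_overlapping_user_lines (p :: c :: rest)
                = p :: merge_overlapping_user_lines (c :: rest) := by
              rw [merge_overlapping_user_lines.eq_def]
              simp [hc2]
            cases hu : PySem.Str.startswith c "User:" with
            | true =>
                rw [(ih (p :: acc)).2 c hu, hA]
                simp
            | false =>
                rw [(ih (c :: p :: acc)).1, hA, mergeA_cons_not_user c rest hu]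
                simp

-- ===== VERDICT (by name: the statement is the Claim_ definition above) =====
theorem merge_overlapping_user_lines_spec : Claim_equal_merge_overlapping_user_lines := by
  intro lines _
  unfold Spec_merge_overlapping_user_lines merge_overlapping_user_lines_alt
  rw [(foldB_main lines []).1]
  simp
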